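-- pv_equiv track=rewrite | github.com/BoraIlkinonu/Chatbot-KB-Maintenance-Mechanism | build_kb.py | extract_curriculum_alignment_from_text
-- ===== SOURCE A (Python) =====
-- def extract_curriculum_alignment_from_text(text):
--     """Extract curriculum alignment standards from DOCX/markdown text.
--     Handles both single-line and multi-line paragraphs where the framework
--     name is on the first line and details follow on subsequent lines.
--     Also finds framework references embedded mid-sentence."""
--     prefixes = [
--         "CSTA", "UK Computer Science", "UK Design", "IB Design",
--         "IB MYP", "NGSS", "Common Core", "ISTE", "OECD",
--         "UK D&T", "AQA",
--     ]
--     results = []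
--     lines = text.split("\n")
--     i = 0
--     while i < len(lines):
--         stripped = lines[i].strip()
--         if not stripped:
--             i += 1
--             continue
--         # Check if this line starts with a known framework prefix
--         matched_prefix = None
--         for prefix in prefixes:
--             if stripped.startswith(prefix):
--                 matched_prefix = prefix
--                 break
--         if matched_prefix:
--             # Collect this line and any continuation lines (indented or non-prefix)
--             block = [stripped]
--             j = i + 1
--             while j < len(lines):
--                 next_line = lines[j].strip()
--                 if not next_line:
--                     break
--                 # Stop if next line starts a new framework prefix
--                 is_new_prefix = any(next_line.startswith(p) for p in prefixes)
--                 if is_new_prefix: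
--                     break
--                 # Stop if next line is a markdown heading
--                 if next_line.startswith("#"):
--                     break
--                 block.append(next_line)
--                 j += 1
--             results.append("\n".join(block))
--             i = j
--         else:
--             # Second pass: check for framework refs embedded mid-sentence
--             for prefix in prefixes:
--                 pos = stripped.find(prefix)
--                 if pos > 0:  # Found mid-line (not at start)
--                     embedded = stripped[pos:].strip()
--                     if embedded not in results:
--                         results.append(embedded)
--             i += 1
--     return results
-- ===== SOURCE B (Python) =====
-- def extract_curriculum_alignment_from_text(text):
--     """Single forward pass over the lines with a running block accumulator
--     (None when not inside a framework block), instead of an index-based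
--     while loop with a nested lookahead loop."""
--     prefixes = [
--         "CSTA", "UK Computer Science", "UK Design", "IB Design",
--         "IB MYP", "NGSS", "Common Core", "ISTE", "OECD",
--         "UK D&T", "AQA",
--     ]
--
--     def embedded_scan(stripped, results):
--         # framework refs embedded mid-sentence (first occurrence, not at start)
--         for prefix in prefixes:
--             pos = stripped.find(prefix)
--             if pos > 0:
--                 embedded = stripped[pos:].strip()
--                 if embedded not in results:
--                     results.append(embedded)
--
--     results = []
--     block = None
--     for line in text.split("\n"):
--         s = line.strip()
--         if block is not None:
--             if not s or any(s.startswith(p) for p in prefixes) or s.startswith("#"):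
--                 results.append("\n".join(block))
--                 block = None
--             else:
--                 block.append(s)
--                 continue
--         if not s:
--             continue
--         if any(s.startswith(p) for p in prefixes):
--             block = [s]
--         else:
--             embedded_scan(s, results)
--     if block is not None:
--         results.append("\n".join(block))
--     return results
-- ===== Notes on version B (the rewrite author's own statement) =====
-- stated objective: simpler
-- what changed: Replaces the index-based while loop with a nested lookahead loop by a single forward pass over the lines that maintains a running block accumulator (an Option that is empty outside a block), flushing the block on blank, prefix or heading lines and reprocessing the terminating line in the same pass.
import Mathlib
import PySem

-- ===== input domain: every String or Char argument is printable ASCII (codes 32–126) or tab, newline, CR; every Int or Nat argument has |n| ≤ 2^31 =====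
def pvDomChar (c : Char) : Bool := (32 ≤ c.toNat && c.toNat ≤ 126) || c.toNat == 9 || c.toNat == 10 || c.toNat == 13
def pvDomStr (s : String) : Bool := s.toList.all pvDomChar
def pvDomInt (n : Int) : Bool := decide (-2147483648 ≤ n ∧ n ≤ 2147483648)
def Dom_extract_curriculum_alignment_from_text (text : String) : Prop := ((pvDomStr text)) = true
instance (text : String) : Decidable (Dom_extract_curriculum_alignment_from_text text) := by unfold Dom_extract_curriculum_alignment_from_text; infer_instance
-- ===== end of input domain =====

-- B replaces A's index-based while loop with a nested lookahead loop by a single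
-- forward pass maintaining a running block accumulator (objective: simpler).


-- ===== PORT A =====

def pvPrefixesA : List String :=
  ["CSTA", "UK Computer Science", "UK Design", "IB Design",
   "IB MYP", "NGSS", "Common Core", "ISTE", "OECD", "UK D&T", "AQA"]

-- A's "for prefix in prefixes: if stripped.startswith(prefix): matched_prefix = prefix; break"
def aFirstPrefix (s : String) : Option String :=
  pvPrefixesA.find? (fun p => PySem.Str.startswith s p)

-- A's second pass: per-prefix first find (pos > 0), append if not already in results
def aEmbedded (stripped : String) (results : List String) : List String :=
  pvPrefixesA.foldl (fun res p =>
    let pos := PySem.Str.find stripped p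
    if pos > 0 then
      let embedded := PySem.Str.strip (PySem.Str.slice stripped (some pos) none)
      if res.contains embedded then res else res ++ [embedded]
    else res) results

-- A's inner while loop at j: the collected continuation lines, and the lines from j on
def aCollect : List String → List String × List String
  | [] => ([], [])
  | l :: ls =>
    let nextLine := PySem.Str.strip l
    if nextLine = "" then ([], l :: ls)
    else if pvPrefixesA.any (fun p => PySem.Str.startswith nextLine p) then ([], l :: ls)
    else if PySem.Str.startswith nextLine "#" then ([], l :: ls)
    else
      let br := aCollect ls
      (nextLine :: br.1, br.2)

theorem aCollect_len_le : ∀ (ls : List String), (aCollect ls).2.length ≤ ls.length := by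
  intro ls
  induction ls with
  | nil => simp [aCollect]
  | cons l ls ih =>
    simp only [aCollect]
    split_ifs <;> simp <;> omega

-- A's outer while loop over the line index i
def aLoop : List String → List String → List String
  | [], results => results
  | l :: ls, results =>
    let stripped := PySem.Str.strip l
    if stripped = "" then aLoop ls results
    else
      match aFirstPrefix stripped with
      | some _ =>
        let br := aCollect ls
        aLoop br.2 (results ++ [PySem.Str.join "\n" (stripped :: br.1)])
      | none => aLoop ls (aEmbedded stripped results)
termination_by ls _ => ls.length
decreasing_by
  all_goals (have h := aCollect_len_le ls; simp; try omega)

-- text.split("\n"): the "\n" separator is non-empty, so split? always returns a value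
def extract_curriculum_alignment_from_text (text : String) : List String :=
  aLoop ((PySem.Str.split? text "\n").getD []) []

-- ===== PORT B =====

def pvPrefixesB : List String :=
  ["CSTA", "UK Computer Science", "UK Design", "IB Design",
   "IB MYP", "NGSS", "Common Core", "ISTE", "OECD", "UK D&T", "AQA"]

def bStartsAny (s : String) : Bool :=
  pvPrefixesB.any (fun p => PySem.Str.startswith s p)

-- Source B's embedded_scan helper
def bEmbeddedScan (stripped : String) (results : List String) : List String :=
  pvPrefixesB.foldl (fun res p =>
    let pos := PySem.Str.find stripped p
    if pos > 0 then
      let embedded := PySem.Str.strip (PySem.Str.slice stripped (some pos) none)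
      if res.contains embedded then res else res ++ [embedded]
    else res) results

-- the non-block case of Source B's loop body (blank skipped / open a block / embedded scan)
def bStep (s : String) (results : List String) : List String × Option (List String) :=
  if s = "" then (results, none)
  else if bStartsAny s then (results, some [s])
  else (bEmbeddedScan s results, none)

-- Source B's single forward pass with the current-block accumulator; final flush at []
def bLoop : List String → List String → Option (List String) → List String
  | [], results, none => results
  | [], results, some blk => results ++ [PySem.Str.join "\n" blk]
  | l :: ls, results, none =>
    let s := PySem.Str.strip l
    let rb := bStep s results
    bLoop ls rb.1 rb.2
  | l :: ls, results, some blk =>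
    let s := PySem.Str.strip l
    if s == "" || bStartsAny s || PySem.Str.startswith s "#" then
      -- flush, then reprocess this line as a fresh non-block case
      let rb := bStep s (results ++ [PySem.Str.join "\n" blk])
      bLoop ls rb.1 rb.2
    else bLoop ls results (some (blk ++ [s]))

def extract_curriculum_alignment_from_text_alt (text : String) : List String :=
  bLoop ((PySem.Str.split? text "\n").getD []) [] none

-- ===== PRECONDITION & SPEC =====
def Spec_extract_curriculum_alignment_from_text (text : String) (out : List String) : Prop := out = extract_curriculum_alignment_from_text_alt text
instance (text : String) (out : List String) : Decidable (Spec_extract_curriculum_alignment_from_text text out) := by unfold Spec_extract_curriculum_alignment_from_text; infer_instance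

-- ===== CLAIM (what is proved, stated in full; the proofs are below) =====
def Claim_equal_extract_curriculum_alignment_from_text : Prop := ∀ (text : String), Dom_extract_curriculum_alignment_from_text text → Spec_extract_curriculum_alignment_from_text text (extract_curriculum_alignment_from_text text)

-- ===== LEMMAS AND PROOFS =====

theorem embedded_eq : aEmbedded = bEmbeddedScan := rfl

theorem prefixes_eq : pvPrefixesA = pvPrefixesB := rfl

theorem anyAB (s : String) :
    pvPrefixesA.any (fun p => PySem.Str.startswith s p) = bStartsAny s := rfl

theorem firstPrefix_isSome (s : String) :
    (aFirstPrefix s).isSome = bStartsAny s := by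
  simp only [aFirstPrefix, bStartsAny, prefixes_eq]
  rw [Bool.eq_iff_iff]
  simp [List.find?_isSome, List.any_eq_true]

-- unfolding equations for A's well-founded loop
theorem aLoop_nil (res : List String) : aLoop [] res = res := by rw [aLoop]

theorem aLoop_blank {l : String} (ls res : List String) (h : PySem.Str.strip l = "") :
    aLoop (l :: ls) res = aLoop ls res := by
  rw [aLoop]; simp [h]

theorem aLoop_prefix {l : String} (ls res : List String) (h : ¬ PySem.Str.strip l = "")
    {p : String} (hf : aFirstPrefix (PySem.Str.strip l) = some p) :
    aLoop (l :: ls) res =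
      aLoop (aCollect ls).2
        (res ++ [PySem.Str.join "\n" (PySem.Str.strip l :: (aCollect ls).1)]) := by
  rw [aLoop]; simp only [if_neg h, hf]

theorem aLoop_embedded {l : String} (ls res : List String) (h : ¬ PySem.Str.strip l = "")
    (hf : aFirstPrefix (PySem.Str.strip l) = none) :
    aLoop (l :: ls) res = aLoop ls (aEmbedded (PySem.Str.strip l) res) := by
  rw [aLoop]; simp only [if_neg h, hf]

-- unfolding equations for B's structural pass
theorem bLoop_none_blank {l : String} (ls res : List String) (h : PySem.Str.strip l = "") :
    bLoop (l :: ls) res none = bLoop ls res none := by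
  show bLoop ls (bStep (PySem.Str.strip l) res).1 (bStep (PySem.Str.strip l) res).2 = _
  rw [show bStep (PySem.Str.strip l) res = (res, none) from by simp [bStep, h]]

theorem bLoop_none_pref {l : String} (ls res : List String) (h : ¬ PySem.Str.strip l = "")
    (hp : bStartsAny (PySem.Str.strip l) = true) :
    bLoop (l :: ls) res none = bLoop ls res (some [PySem.Str.strip l]) := by
  show bLoop ls (bStep (PySem.Str.strip l) res).1 (bStep (PySem.Str.strip l) res).2 = _
  rw [show bStep (PySem.Str.strip l) res = (res, some [PySem.Str.strip l]) from by
    simp [bStep, h, hp]]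

theorem bLoop_none_emb {l : String} (ls res : List String) (h : ¬ PySem.Str.strip l = "")
    (hp : bStartsAny (PySem.Str.strip l) = false) :
    bLoop (l :: ls) res none = bLoop ls (bEmbeddedScan (PySem.Str.strip l) res) none := by
  show bLoop ls (bStep (PySem.Str.strip l) res).1 (bStep (PySem.Str.strip l) res).2 = _
  rw [show bStep (PySem.Str.strip l) res = (bEmbeddedScan (PySem.Str.strip l) res, none) from by
    simp [bStep, h, hp]]

theorem bLoop_some_flush {l : String} (ls res blk : List String)
    (hc : ((PySem.Str.strip l == "") || bStartsAny (PySem.Str.strip l)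
           || PySem.Str.startswith (PySem.Str.strip l) "#") = true) :
    bLoop (l :: ls) res (some blk) =
      bLoop (l :: ls) (res ++ [PySem.Str.join "\n" blk]) none := by
  show (if (PySem.Str.strip l == "") || bStartsAny (PySem.Str.strip l)
          || PySem.Str.startswith (PySem.Str.strip l) "#" then
          bLoop ls (bStep (PySem.Str.strip l) (res ++ [PySem.Str.join "\n" blk])).1
                   (bStep (PySem.Str.strip l) (res ++ [PySem.Str.join "\n" blk])).2
        else bLoop ls res (some (blk ++ [PySem.Str.strip l]))) = _
  rw [if_pos hc]
  rfl

theorem bLoop_some_cont {l : String} (ls res blk : List String)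
    (hc : ((PySem.Str.strip l == "") || bStartsAny (PySem.Str.strip l)
           || PySem.Str.startswith (PySem.Str.strip l) "#") = false) :
    bLoop (l :: ls) res (some blk) = bLoop ls res (some (blk ++ [PySem.Str.strip l])) := by
  show (if (PySem.Str.strip l == "") || bStartsAny (PySem.Str.strip l)
          || PySem.Str.startswith (PySem.Str.strip l) "#" then
          bLoop ls (bStep (PySem.Str.strip l) (res ++ [PySem.Str.join "\n" blk])).1
                   (bStep (PySem.Str.strip l) (res ++ [PySem.Str.join "\n" blk])).2
        else bLoop ls res (some (blk ++ [PySem.Str.strip l]))) = _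
  rw [if_neg (by simp only [hc]; exact Bool.false_ne_true)]

-- the joint invariant: outside a block B's pass is A's loop; inside a block B's pass
-- equals A finishing the block via aCollect and continuing from the remaining lines
set_option maxHeartbeats 1000000 in
theorem loop_eq : ∀ (n : ℕ) (ls : List String), ls.length ≤ n →
    (∀ res, bLoop ls res none = aLoop ls res) ∧
    (∀ res blk, bLoop ls res (some blk) =
      aLoop (aCollect ls).2 (res ++ [PySem.Str.join "\n" (blk ++ (aCollect ls).1)])) := by
  intro n
  induction n with
  | zero =>
    intro ls hls
    have : ls = [] := List.eq_nil_of_length_eq_zero (Nat.le_zero.mp hls)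
    subst this
    simp [bLoop, aLoop_nil, aCollect]
  | succ n ih =>
    intro ls hls
    match ls with
    | [] => simp [bLoop, aLoop_nil, aCollect]
    | l :: ls =>
      have hls' : ls.length ≤ n := by simpa using hls
      have ihl := ih ls hls'
      constructor
      · intro res
        by_cases hs : PySem.Str.strip l = ""
        · rw [bLoop_none_blank ls res hs, aLoop_blank ls res hs]
          exact ihl.1 res
        · cases hfind : aFirstPrefix (PySem.Str.strip l) with
          | none =>
            have hsa : bStartsAny (PySem.Str.strip l) = false := by
              rw [← firstPrefix_isSome, hfind]; rfl
            rw [bLoop_none_emb ls res hs hsa, aLoop_embedded ls res hs hfind, embedded_eq]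
            exact ihl.1 _
          | some p =>
            have hsa : bStartsAny (PySem.Str.strip l) = true := by
              rw [← firstPrefix_isSome, hfind]; rfl
            rw [bLoop_none_pref ls res hs hsa, aLoop_prefix ls res hs hfind, ihl.2]
            simp
      · intro res blk
        by_cases hs : PySem.Str.strip l = ""
        · have hcol : aCollect (l :: ls) = ([], l :: ls) := by simp [aCollect, hs]
          rw [bLoop_some_flush ls res blk (by simp [hs]),
              bLoop_none_blank ls _ hs, ihl.1, hcol, aLoop_blank ls _ hs]
          simp
        · by_cases hp : bStartsAny (PySem.Str.strip l) = true
          · -- new prefix line: flush, open new block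
            have hcol : aCollect (l :: ls) = ([], l :: ls) := by
              simp only [aCollect, if_neg hs, anyAB, hp, if_true]
            cases hf : aFirstPrefix (PySem.Str.strip l) with
            | none =>
              have : bStartsAny (PySem.Str.strip l) = false := by
                rw [← firstPrefix_isSome, hf]; rfl
              rw [this] at hp; exact absurd hp (by simp)
            | some q =>
              rw [bLoop_some_flush ls res blk (by simp [hp]),
                  bLoop_none_pref ls _ hs hp, ihl.2, hcol, aLoop_prefix ls _ hs hf]
              simp
          · have hpf : bStartsAny (PySem.Str.strip l) = false := by simpa using hp
            by_cases hh : PySem.Str.startswith (PySem.Str.strip l) "#" = true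
            · -- heading: flush, then embedded scan on this line
              have hcol : aCollect (l :: ls) = ([], l :: ls) := by
                simp only [aCollect, if_neg hs, anyAB, hpf, hh]; simp
              have hfind : aFirstPrefix (PySem.Str.strip l) = none := by
                have h1 := firstPrefix_isSome (PySem.Str.strip l)
                rw [hpf] at h1
                exact Option.not_isSome_iff_eq_none.mp (by simp [h1])
              rw [bLoop_some_flush ls res blk (by simp only [hh, Bool.or_true]),
                  bLoop_none_emb ls _ hs hpf, ihl.1, hcol,
                  aLoop_embedded ls _ hs hfind, embedded_eq]
              simp
            · -- continuation line: append to block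
              have hhf : PySem.Str.startswith (PySem.Str.strip l) "#" = false := by simpa using hh
              have hcol : aCollect (l :: ls) =
                  (PySem.Str.strip l :: (aCollect ls).1, (aCollect ls).2) := by
                simp only [aCollect, if_neg hs, anyAB, hpf, hhf]; simp
              rw [bLoop_some_cont ls res blk (by simp only [Bool.or_eq_false_iff]; exact ⟨⟨by simp [hs], hpf⟩, hhf⟩), ihl.2, hcol]
              simp

-- ===== VERDICT (by name: the statement is the Claim_ definition above) =====
theorem extract_curriculum_alignment_from_text_spec : Claim_equal_extract_curriculum_alignment_from_text := by
  intro text _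
  unfold Spec_extract_curriculum_alignment_from_text
  unfold extract_curriculum_alignment_from_text extract_curriculum_alignment_from_text_alt
  exact ((loop_eq _ _ le_rfl).1 []).symm
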